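-- pv_equiv track=rewrite | github.com/AGallouin/board-game | django_back/catan/models.py | get_nb_column
-- ===== SOURCE A (Python) =====
-- def get_nb_column(max_player: int) -> list[int]:
--
--     min_col: int = 3
--     # max_player is either 4 or 6
--     max_col: int = int(min_col + max_player / 2)
--     first_half: list[int] = [x for x in range(min_col, max_col + 1)]
--     second_half: list[int] = [x for x in range(min_col, max_col)]
--     second_half.reverse()
--
--     nb_col_per_row: list[int] = first_half + second_half
--
--     return nb_col_per_row
-- ===== SOURCE B (Python) =====
-- def get_nb_column(max_player: int) -> list[int]:
--     min_col: int = 3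
--     max_col: int = int(min_col + max_player / 2)
--     n: int = max_col - min_col
--     return [max_col - abs(i - n) for i in range(2 * n + 1)]
-- ===== Notes on version B (the rewrite author's own statement) =====
-- stated objective: simpler
-- what changed: B builds the symmetric pyramid in a single centered comprehension (max_col - abs(i - n) over one range) instead of constructing two half lists, reversing one and concatenating.
import Mathlib
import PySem

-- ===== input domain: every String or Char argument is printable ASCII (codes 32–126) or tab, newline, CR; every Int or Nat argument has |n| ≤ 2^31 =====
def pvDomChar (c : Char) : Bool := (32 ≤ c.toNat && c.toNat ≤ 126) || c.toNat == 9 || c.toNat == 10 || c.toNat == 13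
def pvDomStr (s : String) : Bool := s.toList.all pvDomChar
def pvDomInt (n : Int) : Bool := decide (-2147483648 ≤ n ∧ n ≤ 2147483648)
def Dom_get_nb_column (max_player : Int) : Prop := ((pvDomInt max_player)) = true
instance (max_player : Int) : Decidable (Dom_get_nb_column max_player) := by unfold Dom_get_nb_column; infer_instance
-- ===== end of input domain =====

-- B builds the symmetric pyramid in one centered pass (max_col - |i - n|) instead of
-- A's two halves + reverse + concatenation; same O(n) cost, simpler assembly.


-- ===== PORT A =====
def get_nb_column (max_player : Int) : List Int :=
  let min_col : Int := 3
  -- int(min_col + max_player / 2): float division then truncation toward zero; on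
  -- |max_player| ≤ 2^31 the float value is exact, so int() equals Int.tdiv (2*min_col + max_player) 2
  let max_col : Int := Int.tdiv (2 * min_col + max_player) 2
  let first_half : List Int := PySem.List.pyRange min_col (max_col + 1) 1
  let second_half : List Int := (PySem.List.pyRange min_col max_col 1).reverse
  first_half ++ second_half

-- ===== PORT B =====
def get_nb_column_alt (max_player : Int) : List Int :=
  let min_col : Int := 3
  let max_col : Int := Int.tdiv (2 * min_col + max_player) 2
  let n : Int := max_col - min_col
  (PySem.List.pyRange 0 (2 * n + 1) 1).map (fun i => max_col - |i - n|)

-- ===== PRECONDITION & SPEC =====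
def Spec_get_nb_column (max_player : Int) (out : List Int) : Prop := out = get_nb_column_alt max_player
instance (max_player : Int) (out : List Int) : Decidable (Spec_get_nb_column max_player out) := by unfold Spec_get_nb_column; infer_instance

-- ===== CLAIM (what is proved, stated in full; the proofs are below) =====
def Claim_equal_get_nb_column : Prop := ∀ (max_player : Int), Dom_get_nb_column max_player → Spec_get_nb_column max_player (get_nb_column max_player)

-- ===== LEMMAS AND PROOFS =====

-- Core identity: ascending run to m followed by the reversed half equals the centered map.
theorem pyramid_key (m : Int) :
    PySem.List.pyRange 3 (m + 1) 1 ++ (PySem.List.pyRange 3 m 1).reverse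
      = (PySem.List.pyRange 0 (2 * (m - 3) + 1) 1).map (fun i => m - |i - (m - 3)|) := by
  apply List.ext_getElem
  · simp [PySem.List.length_pyRange_one]
    omega
  · intro k h1 h2
    simp only [List.length_append, List.length_reverse,
      PySem.List.length_pyRange_one] at h1
    by_cases hk : k < (PySem.List.pyRange 3 (m + 1) 1).length
    · rw [List.getElem_append_left hk]
      rw [PySem.List.getElem_pyRange_one]
      rw [List.getElem_map, PySem.List.getElem_pyRange_one]
      have hk' : k < (m + 1 - 3).toNat := by
        simpa [PySem.List.length_pyRange_one] using hk
      have : |(0 : Int) + (k : Int) - (m - 3)| = (m - 3) - k := by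
        rw [abs_of_nonpos (by omega)]; omega
      rw [this]; omega
    · rw [List.getElem_append_right (by omega)]
      rw [List.getElem_reverse]
      rw [PySem.List.getElem_pyRange_one]
      rw [List.getElem_map, PySem.List.getElem_pyRange_one]
      simp only [PySem.List.length_pyRange_one] at hk ⊢
      have h3 : (m + 1 - 3).toNat ≤ k := by omega
      -- here m ≥ 3 necessarily (otherwise both lists are empty and k has no room)
      have hm : 3 ≤ m := by omega
      have : |(0 : Int) + (k : Int) - (m - 3)| = (k : Int) - (m - 3) := by
        rw [abs_of_nonneg (by omega)]; ring
      rw [this]; omega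

-- ===== VERDICT (by name: the statement is the Claim_ definition above) =====
theorem get_nb_column_spec : Claim_equal_get_nb_column := by
  intro max_player _
  unfold Spec_get_nb_column get_nb_column get_nb_column_alt
  simpa using pyramid_key (Int.tdiv (2 * 3 + max_player) 2)
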